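-- pv_equiv track=rewrite | github.com/luofeisg/OpenKE-PuTransE | benchmarks/Wikidata/Configure_wikidata_evolve_datasets.py | remove_obsolet_triple_ops
-- ===== SOURCE A (Python) =====
-- from collections import Counter, defaultdict
-- import operator
--
-- def remove_obsolet_triple_ops(triple_operations_divided):
--     removed_triples = []
--     new_snapshots_triple_operations = []
--     for snapshot_idx, triple_operations_list in enumerate(triple_operations_divided):
--         # To track operations for a triple in the interval before a snapshot
--         triple_operation_dict = defaultdict(list)
--         for triple_op in triple_operations_list:
--             subj, objc, pred, op_type, ts = triple_op
--
--             if subj == objc: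
--                 continue
--
--             triple = (subj, objc, pred)
--             triple_operation_dict[triple].append(triple_op)
--
--         # Determine all triples with a odd number of triple operations because
--         # those with even numbers are inserted and deleted within the same interval
--         filtered_triple_operations = []
--         for triple, triple_op_list in triple_operation_dict.items():
--             if len(triple_op_list) % 2 != 0:
--                 filtered_triple_operations.append(triple_op_list[-1])
--             else:
--                 removed_triples.append(triple)
--
--         sorted(filtered_triple_operations, key=operator.itemgetter(4, 0, 1, 2, 3))
--         new_snapshots_triple_operations.append(filtered_triple_operations)
--
--     return new_snapshots_triple_operations
-- ===== SOURCE B (Python) =====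
-- def _filter_snapshot(triple_operations_list):
--     # triple -> last op seen if the triple's (non-reflexive) op count so far is odd, else None;
--     # each occurrence toggles the entry, so no counts or per-triple lists are kept.
--     last = {}
--     for triple_op in triple_operations_list:
--         subj, objc, pred, op_type, ts = triple_op
--         if subj == objc:
--             continue
--         triple = (subj, objc, pred)
--         last[triple] = None if last.get(triple) is not None else triple_op
--     return [op for op in last.values() if op is not None]
--
-- def remove_obsolet_triple_ops(triple_operations_divided):
--     return [_filter_snapshot(ops) for ops in triple_operations_divided]
-- ===== Notes on version B (the rewrite author's own statement) =====
-- stated objective: simpler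
-- what changed: Replaces the group-into-lists-then-filter-odd-groups two-phase pass by a single parity-toggle pass: a dict maps each triple to its last op when its count so far is odd and to None when even, so the per-triple lists, the unused removed_triples accumulator and the discarded sorted() call disappear.
import Mathlib
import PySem

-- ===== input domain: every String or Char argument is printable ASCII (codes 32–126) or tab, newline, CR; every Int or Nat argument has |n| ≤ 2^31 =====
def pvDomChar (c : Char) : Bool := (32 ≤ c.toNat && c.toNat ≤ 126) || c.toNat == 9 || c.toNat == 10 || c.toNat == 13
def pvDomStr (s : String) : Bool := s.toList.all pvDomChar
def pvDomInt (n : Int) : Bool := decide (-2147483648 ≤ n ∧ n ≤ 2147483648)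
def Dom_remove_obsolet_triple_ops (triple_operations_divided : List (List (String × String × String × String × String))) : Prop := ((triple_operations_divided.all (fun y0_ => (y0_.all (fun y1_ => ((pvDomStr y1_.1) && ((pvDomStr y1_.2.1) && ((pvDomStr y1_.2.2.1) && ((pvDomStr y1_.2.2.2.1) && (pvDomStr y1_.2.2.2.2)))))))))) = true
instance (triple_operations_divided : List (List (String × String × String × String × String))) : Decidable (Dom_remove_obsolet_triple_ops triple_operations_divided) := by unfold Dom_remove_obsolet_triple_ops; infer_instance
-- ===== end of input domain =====

-- B replaces A's group-into-lists-then-keep-odd-groups pass by a single parity-toggle pass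
-- (dict: triple -> last op when seen an odd number of times, None when even); same return value, proved equal.

abbrev pvOp : Type := String × String × String × String × String
abbrev pvTrip : Type := String × String × String

-- ===== PORT A =====
-- triple = (subj, objc, pred)
def pvKeyOf (triple_op : pvOp) : pvTrip := (triple_op.1, triple_op.2.1, triple_op.2.2.1)

-- the body of A's first inner loop (defaultdict(list): triple_operation_dict[triple].append(triple_op))
def pvStepA (d : PySem.Dict pvTrip (List pvOp)) (triple_op : pvOp) : PySem.Dict pvTrip (List pvOp) :=
  if triple_op.1 = triple_op.2.1 then d       -- 'if subj == objc: continue'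
  else d.modify (pvKeyOf triple_op) [] (fun l => l ++ [triple_op])

def pvGroupA (triple_operations_list : List pvOp) : PySem.Dict pvTrip (List pvOp) :=
  triple_operations_list.foldl pvStepA PySem.Dict.empty

-- A's second inner loop over triple_operation_dict.items(); state = (filtered_triple_operations, removed_triples)
def pvStepF (acc : List pvOp × List pvTrip) (kv : pvTrip × List pvOp) : List pvOp × List pvTrip :=
  if kv.2.length % 2 ≠ 0 then
    -- triple_op_list[-1]: the grouped lists are never empty, so the default is never used
    (acc.1 ++ [PySem.List.pyGetD kv.2 (-1) ("", "", "", "", "")], acc.2)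
  else (acc.1, acc.2 ++ [kv.1])

-- the discarded 'sorted(filtered_triple_operations, key=...)' expression has no effect and is not ported
def remove_obsolet_triple_ops (triple_operations_divided : List (List (String × String × String × String × String))) : List (List (String × String × String × String × String)) :=
  (triple_operations_divided.foldl
    (fun acc triple_operations_list =>
      let pr := (pvGroupA triple_operations_list).items.foldl pvStepF ([], [])
      (acc.1 ++ [pr.1], acc.2 ++ pr.2))
    (([] : List (List pvOp)), ([] : List pvTrip))).1

-- ===== PORT B =====
-- the body of B's loop: each non-reflexive occurrence toggles the triple's entry in place
def pvStepB (d : PySem.Dict pvTrip (Option pvOp)) (triple_op : pvOp) : PySem.Dict pvTrip (Option pvOp) :=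
  if triple_op.1 = triple_op.2.1 then d
  else d.insert (pvKeyOf triple_op)
    (if (d.getD (pvKeyOf triple_op) none).isSome then none else some triple_op)

def pvSnapB (triple_operations_list : List pvOp) : List pvOp :=
  (triple_operations_list.foldl pvStepB PySem.Dict.empty).values.filterMap id

def remove_obsolet_triple_ops_alt (triple_operations_divided : List (List (String × String × String × String × String))) : List (List (String × String × String × String × String)) :=
  triple_operations_divided.map pvSnapB

-- ===== PRECONDITION & SPEC =====
def Spec_remove_obsolet_triple_ops (triple_operations_divided : List (List (String × String × String × String × String))) (out : List (List (String × String × String × String × String))) : Prop := out = remove_obsolet_triple_ops_alt triple_operations_divided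
instance (triple_operations_divided : List (List (String × String × String × String × String))) (out : List (List (String × String × String × String × String))) : Decidable (Spec_remove_obsolet_triple_ops triple_operations_divided out) := by unfold Spec_remove_obsolet_triple_ops; infer_instance

-- ===== CLAIM (what is proved, stated in full; the proofs are below) =====
def Claim_equal_remove_obsolet_triple_ops : Prop := ∀ (triple_operations_divided : List (List (String × String × String × String × String))), Dom_remove_obsolet_triple_ops triple_operations_divided → Spec_remove_obsolet_triple_ops triple_operations_divided (remove_obsolet_triple_ops triple_operations_divided)

-- ===== LEMMAS AND PROOFS =====

-- abstraction of a grouped list into B's toggle entry: last element if the count is odd, none if even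
def pvG (vl : List pvOp) : Option pvOp := if vl.length % 2 = 1 then vl.getLast? else none
def pvF (kv : pvTrip × List pvOp) : pvTrip × Option pvOp := (kv.1, pvG kv.2)

theorem pvG_append (vl : List pvOp) (op : pvOp) :
    pvG (vl ++ [op]) = if (pvG vl).isSome then none else some op := by
  by_cases h : vl.length % 2 = 1
  · have hne : vl ≠ [] := by intro e; subst e; simp at h
    simp [pvG, h, List.getLast?_isSome.mpr hne]
    omega
  · simp [pvG, h]
    omega

theorem pvG_toggle (o : Option (List pvOp)) (op : pvOp) :
    pvG (o.getD [] ++ [op]) = if ((o.map pvG).getD none).isSome then none else some op := by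
  cases o with
  | none => simp [pvG]
  | some vl => simpa using pvG_append vl op

theorem pv_get?_map (its : List (pvTrip × List pvOp)) (k : pvTrip) :
    (PySem.Dict.mk (its.map pvF)).get? k = ((PySem.Dict.mk its).get? k).map pvG := by
  induction its with
  | nil => simp [PySem.Dict.get?]
  | cons kv rest ih =>
    obtain ⟨kk, vv⟩ := kv
    simp only [List.map_cons, pvF, PySem.Dict.get?_mk_cons]
    split_ifs <;> simp [ih]

theorem pv_contains_map (its : List (pvTrip × List pvOp)) (k : pvTrip) :
    (PySem.Dict.mk (its.map pvF)).contains k = (PySem.Dict.mk its).contains k := by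
  simp [PySem.Dict.contains, List.any_map, Function.comp_def, pvF]

theorem pv_insert_rel (its : List (pvTrip × List pvOp)) (op : pvOp) :
    (PySem.Dict.mk (its.map pvF)).insert (pvKeyOf op)
      (if ((PySem.Dict.mk (its.map pvF)).getD (pvKeyOf op) none).isSome then none else some op)
    = PySem.Dict.mk ((((PySem.Dict.mk its).insert (pvKeyOf op)
        (((PySem.Dict.mk its).getD (pvKeyOf op) []) ++ [op]))).items.map pvF) := by
  have hv : (if ((PySem.Dict.mk (its.map pvF)).getD (pvKeyOf op) none).isSome then none else some op)
      = pvG (((PySem.Dict.mk its).getD (pvKeyOf op) []) ++ [op]) := by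
    rw [PySem.Dict.getD, PySem.Dict.getD, pv_get?_map]
    exact (pvG_toggle ((PySem.Dict.mk its).get? (pvKeyOf op)) op).symm
  rw [hv]
  simp only [PySem.Dict.insert, pv_contains_map]
  split_ifs with h
  · congr 1
    rw [List.map_map, List.map_map]
    apply List.map_congr_left
    intro p _
    by_cases hp : p.1 = pvKeyOf op
    · simp [pvF, hp]
    · simp [pvF, hp]
  · simp [pvF]

theorem pv_fold_rel (l : List pvOp) : ∀ (its : List (pvTrip × List pvOp)),
    l.foldl pvStepB (PySem.Dict.mk (its.map pvF))
    = PySem.Dict.mk ((l.foldl pvStepA (PySem.Dict.mk its)).items.map pvF) := by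
  induction l with
  | nil => intro its; rfl
  | cons op rest ih =>
    intro its
    simp only [List.foldl_cons]
    by_cases h : op.1 = op.2.1
    · simp only [pvStepA, pvStepB, if_pos h]
      exact ih its
    · simp only [pvStepA, pvStepB, if_neg h, PySem.Dict.modify]
      rw [pv_insert_rel]
      exact ih _

theorem pv_pyGetD_last (vl : List pvOp) (h : vl ≠ []) (d : pvOp) :
    PySem.List.pyGetD vl (-1) d = vl.getLast?.getD d := by
  simp only [PySem.List.pyGetD, PySem.List.pyGet?, PySem.List.pyIdx?, Int.reduceNeg, Int.neg_nonneg,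
    Int.reduceLE, ↓reduceIte, neg_le_neg_iff, Nat.one_le_cast, neg_neg, Int.toNat_one]
  have hl : 1 ≤ vl.length := List.length_pos_of_ne_nil h
  simp [hl, List.getLast?_eq_getElem?]

theorem pv_filter_spec : ∀ (its : List (pvTrip × List pvOp)) (a : List pvOp) (b : List pvTrip),
    (its.foldl pvStepF (a, b)).1 = a ++ its.filterMap (fun kv => pvG kv.2) := by
  intro its
  induction its with
  | nil => intro a b; simp
  | cons kv rest ih =>
    intro a b
    by_cases h : kv.2.length % 2 = 1
    · have hne : kv.2 ≠ [] := by intro e; rw [e] at h; simp at h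
      obtain ⟨x, hx⟩ := Option.isSome_iff_exists.mp (List.getLast?_isSome.mpr hne)
      have hg : pvG kv.2 = some x := by simp [pvG, h, hx]
      simp only [List.foldl_cons, pvStepF, if_pos (by omega : kv.2.length % 2 ≠ 0),
        pv_pyGetD_last kv.2 hne, hx, List.filterMap_cons, hg, Option.getD_some]
      rw [ih]
      simp
    · have hg : pvG kv.2 = none := by simp [pvG, h]
      simp only [List.foldl_cons, pvStepF, if_neg (by omega : ¬ kv.2.length % 2 ≠ 0),
        List.filterMap_cons, hg]
      exact ih a (b ++ [kv.1])

theorem pv_snap_eq (l : List pvOp) : ((pvGroupA l).items.foldl pvStepF ([], [])).1 = pvSnapB l := by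
  rw [pv_filter_spec]
  unfold pvSnapB
  have h := pv_fold_rel l []
  simp only [List.map_nil] at h
  rw [show (PySem.Dict.empty : PySem.Dict pvTrip (Option pvOp)) = PySem.Dict.mk [] from rfl, h]
  simp only [PySem.Dict.values, List.map_map, List.filterMap_map, List.nil_append]
  rfl

theorem pv_outer (tod : List (List pvOp)) (a : List (List pvOp)) (b : List pvTrip) :
    (tod.foldl
      (fun acc triple_operations_list =>
        let pr := (pvGroupA triple_operations_list).items.foldl pvStepF ([], [])
        (acc.1 ++ [pr.1], acc.2 ++ pr.2)) (a, b)).1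
    = a ++ tod.map pvSnapB := by
  induction tod generalizing a b with
  | nil => simp
  | cons l rest ih =>
    simp only [List.foldl_cons, List.map_cons]
    rw [ih]
    simp [pv_snap_eq]

-- ===== VERDICT (by name: the statement is the Claim_ definition above) =====
theorem remove_obsolet_triple_ops_spec : Claim_equal_remove_obsolet_triple_ops := by
  intro tod _
  show remove_obsolet_triple_ops tod = remove_obsolet_triple_ops_alt tod
  unfold remove_obsolet_triple_ops remove_obsolet_triple_ops_alt
  rw [pv_outer]
  simp
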